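-- pv_equiv track=rewrite | github.com/BakedSoups/NextSteamGame | db_creation/canon_pipeline/candidate_search.py | format_representative_tag
-- ===== SOURCE A (Python) =====
-- HYPHENATED_COMPOUNDS = {
--     ("action", "packed"): "action-packed",
--     ("fast", "paced"): "fast-paced",
--     ("real", "time"): "real-time",
-- }
--
-- def tokenize(tag: str) -> list[str]:
--     return [token for token in tag.split() if token]
--
-- def is_form_factor(token: str) -> bool:
--     return any(char.isdigit() for char in token) or len(token) <= 3 and token.isalpha()
--
-- def format_representative_tag(context: str, normalized_tag: str) -> str:
--     tokens = tokenize(normalized_tag)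
--     parts: list[str] = []
--     index = 0
--     while index < len(tokens):
--         pair = tuple(tokens[index : index + 2])
--         if pair in HYPHENATED_COMPOUNDS:
--             compound = HYPHENATED_COMPOUNDS[pair]
--             if context.startswith("genre_tree."):
--                 compound = "-".join(part.capitalize() for part in compound.split("-"))
--             parts.append(compound)
--             index += 2
--             continue
--
--         token = tokens[index]
--         if is_form_factor(token):
--             parts.append(token.upper() if token.isalpha() and len(token) <= 3 else token.upper().replace("D", "D"))
--         elif token.isupper():
--             parts.append(token)
--         elif context.startswith("genre_tree."):
--             parts.append(token.capitalize())
--         else: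
--             parts.append(token)
--         index += 1
--     return " ".join(parts)
-- ===== SOURCE B (Python) =====
-- HYPHENATED_COMPOUNDS = {
--     ("action", "packed"): "action-packed",
--     ("fast", "paced"): "fast-paced",
--     ("real", "time"): "real-time",
-- }
--
-- def _fmt(token, genre):
--     if any(ch.isdigit() for ch in token) or (len(token) <= 3 and token.isalpha()):
--         return token.upper()
--     if token.isupper():
--         return token
--     return token.capitalize() if genre else token
--
-- def format_representative_tag(context: str, normalized_tag: str) -> str:
--     # single pass with a one-token look-behind buffer instead of index + lookahead
--     genre = context.startswith("genre_tree.")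
--     parts = []
--     pending = None
--     for token in normalized_tag.split():
--         if pending is not None and (pending, token) in HYPHENATED_COMPOUNDS:
--             compound = HYPHENATED_COMPOUNDS[(pending, token)]
--             if genre:
--                 compound = "-".join(p.capitalize() for p in compound.split("-"))
--             parts.append(compound)
--             pending = None
--         else:
--             if pending is not None:
--                 parts.append(_fmt(pending, genre))
--             pending = token
--     if pending is not None:
--         parts.append(_fmt(pending, genre))
--     return " ".join(parts)
-- ===== Notes on version B (the rewrite author's own statement) =====
-- stated objective: alternative
-- what changed: A's index-based while loop with a two-token lookahead slice is replaced by a single left fold over the tokens carrying a one-token look-behind buffer (pending): a compound is recognized when the incoming token pairs with the buffered one, otherwise the buffer is flushed through the formatting rules; the no-op '.upper().replace("D","D")' arm collapses to '.upper()' and the context check is hoisted out of the loop.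
import Mathlib
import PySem

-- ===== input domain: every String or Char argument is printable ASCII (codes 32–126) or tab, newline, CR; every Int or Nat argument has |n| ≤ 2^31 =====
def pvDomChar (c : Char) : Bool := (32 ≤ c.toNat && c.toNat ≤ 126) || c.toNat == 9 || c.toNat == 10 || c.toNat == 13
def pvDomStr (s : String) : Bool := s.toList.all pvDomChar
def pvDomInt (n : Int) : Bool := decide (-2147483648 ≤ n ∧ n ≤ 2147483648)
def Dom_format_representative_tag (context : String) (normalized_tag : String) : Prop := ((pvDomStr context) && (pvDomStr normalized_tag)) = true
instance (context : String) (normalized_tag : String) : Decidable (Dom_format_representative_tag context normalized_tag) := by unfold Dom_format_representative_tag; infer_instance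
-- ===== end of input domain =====

-- B replaces A's index-based 2-lookahead while loop with a single fold carrying a one-token
-- look-behind buffer, and collapses the no-op '.replace("D","D")' arm to '.upper()' (alternative).

-- ===== PORT A =====
-- shared module-level context (HYPHENATED_COMPOUNDS, tokenize, is_form_factor) and
-- ports of the str methods capitalize/isupper (exact on the ASCII domain)
def HYPHENATED_COMPOUNDS : PySem.Dict (List Char × List Char) (List Char) :=
  PySem.Dict.ofList
    [ (("action".toList, "packed".toList), "action-packed".toList)
    , (("fast".toList, "paced".toList), "fast-paced".toList)
    , (("real".toList, "time".toList), "real-time".toList) ]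

def pyTokenize (cs : List Char) : List (List Char) :=
  (PySem.Chars.split₀ cs).filter (fun t => !t.isEmpty)

def pyIsFormFactor (cs : List Char) : Bool :=
  cs.any PySem.Chars.isdigit || (decide (cs.length ≤ 3) && PySem.Chars.strIsalpha cs)

-- str.capitalize(): first character uppercased, the rest lowercased (exact on ASCII)
def pyCapitalize (cs : List Char) : List Char :=
  match cs with
  | [] => []
  | c :: rest => PySem.Chars.upperChar c :: PySem.Chars.lower rest

-- str.isupper(): at least one cased character and no lowercase one (on ASCII, cased = alphabetic)
def pyStrIsupper (cs : List Char) : Bool :=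
  cs.any PySem.Chars.isalpha && cs.all (fun c => !PySem.Chars.islower c)

-- the body A's while-loop runs when the 2-token pair is not a compound (A executes the same
-- branch chain both in the general step and on a final single token, where the 1-tuple never matches)
def formatA_single (ctx : List Char) (t : List Char) : List Char :=
  if pyIsFormFactor t then
    (if PySem.Chars.strIsalpha t && decide (t.length ≤ 3) then PySem.Chars.upper t
     else PySem.Chars.replace (PySem.Chars.upper t) ['D'] ['D'])
  else if pyStrIsupper t then t
  else if PySem.Chars.startswith ctx "genre_tree.".toList then pyCapitalize t
  else t

-- A's while-loop over the token list with its explicit index, as structural recursion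
def formatA_loop (ctx : List Char) : List (List Char) → List (List Char)
  | [] => []
  | [t] => [formatA_single ctx t]
  | t1 :: t2 :: rest =>
    match HYPHENATED_COMPOUNDS.get? (t1, t2) with
    | some compound =>
        (if PySem.Chars.startswith ctx "genre_tree.".toList then
           PySem.Chars.join ['-'] ((PySem.Chars.splitOn compound ['-']).map pyCapitalize)
         else compound) :: formatA_loop ctx rest
    | none => formatA_single ctx t1 :: formatA_loop ctx (t2 :: rest)

def format_representative_tag (context : String) (normalized_tag : String) : String :=
  String.ofList (PySem.Chars.join [' '] (formatA_loop context.toList (pyTokenize normalized_tag.toList)))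

-- ===== PORT B =====
-- B's _fmt: the formatting rules for one buffered single token (genre hoisted out of the loop)
def fmtB (genre : Bool) (t : List Char) : List Char :=
  if pyIsFormFactor t then PySem.Chars.upper t
  else if pyStrIsupper t then t
  else if genre then pyCapitalize t
  else t

-- the compound rendering inlined in B's loop body
def compB (genre : Bool) (c : List Char) : List Char :=
  if genre then PySem.Chars.join ['-'] ((PySem.Chars.splitOn c ['-']).map pyCapitalize) else c

-- one iteration of B's for-loop: state = (parts, pending look-behind buffer)
def stepB (genre : Bool) (st : List (List Char) × Option (List Char)) (tok : List Char) :
    List (List Char) × Option (List Char) :=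
  match st with
  | (parts, some p) =>
    match HYPHENATED_COMPOUNDS.get? (p, tok) with
    | some c => (parts ++ [compB genre c], none)
    | none => (parts ++ [fmtB genre p], some tok)
  | (parts, none) => (parts, some tok)

-- the final 'if pending is not None' flush after the loop
def flushB (genre : Bool) (st : List (List Char) × Option (List Char)) : List (List Char) :=
  match st with
  | (parts, some p) => parts ++ [fmtB genre p]
  | (parts, none) => parts

def format_representative_tag_alt (context : String) (normalized_tag : String) : String :=
  let genre := PySem.Chars.startswith context.toList "genre_tree.".toList
  String.ofList (PySem.Chars.join [' ']
    (flushB genre ((PySem.Chars.split₀ normalized_tag.toList).foldl (stepB genre) ([], none))))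

-- ===== PRECONDITION & SPEC =====
def Spec_format_representative_tag (context : String) (normalized_tag : String) (out : String) : Prop := out = format_representative_tag_alt context normalized_tag
instance (context : String) (normalized_tag : String) (out : String) : Decidable (Spec_format_representative_tag context normalized_tag out) := by unfold Spec_format_representative_tag; infer_instance

-- ===== CLAIM (what is proved, stated in full; the proofs are below) =====
def Claim_equal_format_representative_tag : Prop := ∀ (context : String) (normalized_tag : String), Dom_format_representative_tag context normalized_tag → Spec_format_representative_tag context normalized_tag (format_representative_tag context normalized_tag)

-- ===== LEMMAS AND PROOFS =====
-- str.split() never yields an empty token, so A's filter is the identity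
theorem split₀_go_ne_nil : ∀ (s cur : List Char) (acc : List (List Char)),
    (∀ t ∈ acc, t ≠ []) → ∀ t ∈ PySem.Chars.split₀.go s cur acc, t ≠ [] := by
  intro s
  induction s with
  | nil =>
    intro cur acc hacc t ht
    by_cases h : cur.isEmpty = true
    · simp [PySem.Chars.split₀.go, h] at ht
      exact hacc t ht
    · simp [PySem.Chars.split₀.go, h] at ht
      rcases ht with h1 | h2
      · exact hacc t h1
      · subst h2; simpa [List.isEmpty_iff] using h
  | cons c rest ih =>
    intro cur acc hacc t ht
    rw [PySem.Chars.split₀.go] at ht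
    by_cases hs : PySem.Chars.isspace c = true
    · by_cases he : cur.isEmpty = true
      · simp [hs, he] at ht; exact ih [] acc hacc t ht
      · simp [hs, he] at ht
        refine ih [] (cur.reverse :: acc) ?_ t ht
        intro u hu
        rw [List.mem_cons] at hu
        rcases hu with h1 | h2
        · subst h1; simpa [List.isEmpty_iff] using he
        · exact hacc u h2
    · simp [hs] at ht; exact ih (c :: cur) acc hacc t ht

theorem tokenize_eq_split₀ (cs : List Char) :
    pyTokenize cs = PySem.Chars.split₀ cs := by
  unfold pyTokenize
  apply List.filter_eq_self.mpr
  intro t ht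
  have := split₀_go_ne_nil cs [] [] (by simp) t (by simpa [PySem.Chars.split₀] using ht)
  simpa [List.isEmpty_iff] using this

theorem replace_go_DD (fuel : Nat) : ∀ (l acc : List Char),
    PySem.Chars.replace.go ['D'] ['D'] fuel l acc = acc.reverse ++ l := by
  induction fuel with
  | zero => intro l acc; rfl
  | succ n ih =>
    intro l acc
    cases l with
    | nil => simp [PySem.Chars.replace.go]
    | cons c t =>
      rw [PySem.Chars.replace.go]
      by_cases h : List.isPrefixOf ['D'] (c :: t) = true
      · have hc : c = 'D' := by
          simp [List.isPrefixOf] at h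
          exact h.symm
        simp [ih, hc]
      · simp [h, ih]

theorem replace_DD (cs : List Char) : PySem.Chars.replace cs ['D'] ['D'] = cs := by
  rw [PySem.Chars.replace]
  simp [replace_go_DD]

theorem single_eq_fmtB (ctx t : List Char) :
    formatA_single ctx t = fmtB (PySem.Chars.startswith ctx "genre_tree.".toList) t := by
  simp only [formatA_single, fmtB]
  split_ifs <;> simp [replace_DD]

-- loop invariant: folding B's step from (parts, pending) and flushing equals parts followed
-- by A's loop run on the still-unprocessed tokens (pending first)
theorem fold_eq_loop (ctx : List Char) : ∀ (ts : List (List Char)) (parts : List (List Char))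
    (pend : Option (List Char)),
    flushB (PySem.Chars.startswith ctx "genre_tree.".toList)
      (ts.foldl (stepB (PySem.Chars.startswith ctx "genre_tree.".toList)) (parts, pend))
      = parts ++ formatA_loop ctx (pend.toList ++ ts) := by
  intro ts
  induction ts with
  | nil =>
    intro parts pend
    cases pend with
    | none => simp [flushB, formatA_loop]
    | some p => simp [flushB, formatA_loop, single_eq_fmtB]
  | cons t ts ih =>
    intro parts pend
    cases pend with
    | none =>
      simpa [stepB] using ih parts (some t)
    | some p =>
      cases hc : HYPHENATED_COMPOUNDS.get? (p, t) with
      | some c =>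
        have key : stepB (PySem.Chars.startswith ctx "genre_tree.".toList) (parts, some p) t
            = (parts ++ [compB (PySem.Chars.startswith ctx "genre_tree.".toList) c], none) := by
          simp [stepB, hc]
        rw [List.foldl_cons, key, ih]
        simp [formatA_loop, hc, compB]
      | none =>
        have key : stepB (PySem.Chars.startswith ctx "genre_tree.".toList) (parts, some p) t
            = (parts ++ [fmtB (PySem.Chars.startswith ctx "genre_tree.".toList) p], some t) := by
          simp [stepB, hc]
        rw [List.foldl_cons, key, ih]
        cases ts with
        | nil => simp [formatA_loop, hc, single_eq_fmtB]
        | cons u us =>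
          cases hcu : HYPHENATED_COMPOUNDS.get? (t, u) <;>
            simp [formatA_loop, hc, hcu, single_eq_fmtB]

-- ===== VERDICT (by name: the statement is the Claim_ definition above) =====
theorem format_representative_tag_spec : Claim_equal_format_representative_tag := by
  intro context normalized_tag _
  have h := fold_eq_loop context.toList (PySem.Chars.split₀ normalized_tag.toList) [] none
  simp only [Option.toList, List.nil_append] at h
  unfold Spec_format_representative_tag format_representative_tag format_representative_tag_alt
  rw [tokenize_eq_split₀, ← h]
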